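-- pv_equiv track=rewrite | github.com/the-omega-institute/branch-cubic-regular-s4-closure-prym-ray-class | scripts/exp_conductor_xa.py | count_affine
-- ===== SOURCE A (Python) =====
-- def legendre(a, p):
--     a = a % p
--     if a == 0:
--         return 0
--     val = pow(a, (p - 1) // 2, p)
--     return val if val <= 1 else val - p
--
-- def count_affine(coeffs_list, p):
--     total = 0
--     for yv in range(p):
--         fv = 0
--         for c in coeffs_list:
--             fv = (fv * yv + c) % p
--         ls = legendre(fv, p)
--         if ls == 0:
--             total += 1
--         elif ls == 1:
--             total += 2
--     return total
-- ===== SOURCE B (Python) =====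
-- def count_affine(coeffs_list, p):
--     # Build the residue table once, then classify by membership:
--     # no per-point modular exponentiation is needed.
--     squares = set(x * x % p for x in range(p))
--     total = 0
--     for yv in range(p):
--         fv = 0
--         for c in coeffs_list:
--             fv = (fv * yv + c) % p
--         if fv == 0:
--             total += 1
--         elif fv in squares:
--             total += 2
--     return total
-- ===== Notes on version B (the rewrite author's own statement) =====
-- stated objective: alternative
-- what changed: B precomputes the set of quadratic residues mod p once and classifies each Horner value by set membership, instead of A's per-y Euler-criterion modular exponentiation; Pre_ excludes composite moduli p >= 2, where A's Euler-criterion legendre is meaningless for counting points over F_p while B counts genuine squares.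
-- outside the precondition, e.g. on count_affine([1, 0], 8): A returns 6, B returns 5
import Mathlib
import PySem

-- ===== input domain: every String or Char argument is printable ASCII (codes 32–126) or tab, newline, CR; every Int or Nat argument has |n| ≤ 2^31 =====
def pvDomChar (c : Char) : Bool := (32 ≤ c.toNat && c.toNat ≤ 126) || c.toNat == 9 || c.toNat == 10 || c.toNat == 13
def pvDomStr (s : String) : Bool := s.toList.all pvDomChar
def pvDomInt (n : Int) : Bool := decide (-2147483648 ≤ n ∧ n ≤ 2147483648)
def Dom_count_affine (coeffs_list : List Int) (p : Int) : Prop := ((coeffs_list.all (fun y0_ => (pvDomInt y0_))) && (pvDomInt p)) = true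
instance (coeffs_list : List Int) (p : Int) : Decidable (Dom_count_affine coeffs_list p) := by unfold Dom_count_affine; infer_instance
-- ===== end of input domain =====

-- B replaces the per-point Euler-criterion modular exponentiation by a quadratic-residue
-- table built once, classifying each Horner value by set membership; on prime (or ≤ 1)
-- moduli the counts agree (objective: alternative algorithm of similar cost).

-- ===== PORT A =====
-- `.toNat` on the exponent is exact here: count_affine only calls legendre with p ≥ 1,
-- so (p - 1) // 2 ≥ 0 (Python pow's negative-exponent path is never reached).
def legendre (a p : Int) : Int :=
  let a := PySem.Int.mod a p
  if a = 0 then 0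
  else
    let val := PySem.Int.powMod a (PySem.Int.floordiv (p - 1) 2).toNat p
    if val ≤ 1 then val else val - p

def count_affine (coeffs_list : List Int) (p : Int) : Int :=
  (PySem.List.pyRange 0 p 1).foldl (fun total yv =>
    let fv := coeffs_list.foldl (fun fv c => PySem.Int.mod (fv * yv + c) p) 0
    let ls := legendre fv p
    if ls = 0 then total + 1
    else if ls = 1 then total + 2
    else total) 0

-- ===== PORT B =====
def count_affine_alt (coeffs_list : List Int) (p : Int) : Int :=
  let squares : PySem.Set Int :=
    PySem.Set.ofList ((PySem.List.pyRange 0 p 1).map (fun x => PySem.Int.mod (x * x) p))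
  (PySem.List.pyRange 0 p 1).foldl (fun total yv =>
    let fv := coeffs_list.foldl (fun fv c => PySem.Int.mod (fv * yv + c) p) 0
    if fv = 0 then total + 1
    else if squares.contains fv then total + 2
    else total) 0

-- ===== PRECONDITION & SPEC =====
-- Pre_ excludes composite moduli p ≥ 2, on which A still returns a value: there A's
-- Euler-criterion legendre is meaningless for counting points over F_p (it is the
-- function's natural domain that p be prime), and B counts genuine quadratic residues.
def Pre_count_affine (coeffs_list : List Int) (p : Int) : Prop :=
  p ≤ 1 ∨ Nat.Prime p.toNat
instance (coeffs_list : List Int) (p : Int) : Decidable (Pre_count_affine coeffs_list p) := by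
  unfold Pre_count_affine; infer_instance

def pvWitness_count_affine : List Int × Int := ([1, 0], 5)

def Spec_count_affine (coeffs_list : List Int) (p : Int) (out : Int) : Prop := out = count_affine_alt coeffs_list p
instance (coeffs_list : List Int) (p : Int) (out : Int) : Decidable (Spec_count_affine coeffs_list p out) := by unfold Spec_count_affine; infer_instance

-- ===== CLAIM (what is proved, stated in full; the proofs are below) =====
def Claim_equal_count_affine : Prop := ∀ (coeffs_list : List Int) (p : Int), Dom_count_affine coeffs_list p → Pre_count_affine coeffs_list p → Spec_count_affine coeffs_list p (count_affine coeffs_list p)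

-- ===== LEMMAS AND PROOFS =====

-- The Horner value is a residue: it lies in [0, p).
lemma horner_range (coeffs : List Int) (p yv fv0 : Int) (hp : 0 < p)
    (h : 0 ≤ fv0 ∧ fv0 < p) :
    0 ≤ coeffs.foldl (fun fv c => PySem.Int.mod (fv * yv + c) p) fv0 ∧
      coeffs.foldl (fun fv c => PySem.Int.mod (fv * yv + c) p) fv0 < p := by
  induction coeffs generalizing fv0 with
  | nil => exact h
  | cons c cs ih =>
    exact ih _ ⟨PySem.Int.mod_nonneg _ hp, PySem.Int.mod_lt _ hp⟩

-- Int casts into ZMod p.toNat are injective on [0, p).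
lemma zcast_inj (p u v : Int) (n : Nat) (hn : (n : Int) = p)
    (hu : 0 ≤ u) (hu' : u < p) (hv : 0 ≤ v) (hv' : v < p)
    (h : (u : ZMod n) = (v : ZMod n)) : u = v := by
  rw [ZMod.intCast_eq_intCast_iff'] at h
  rwa [hn, Int.emod_eq_of_lt hu hu', Int.emod_eq_of_lt hv hv'] at h

-- Membership in B's residue table is being a square in ZMod p.toNat.
lemma squares_mem (p fv : Int) (n : Nat) (hn : (n : Int) = p) (hp : 0 < p)
    (hfv : 0 ≤ fv) (hfv' : fv < p) :
    (PySem.Set.contains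
        (PySem.Set.ofList ((PySem.List.pyRange 0 p 1).map (fun x => PySem.Int.mod (x * x) p)))
        fv) = true ↔ IsSquare (fv : ZMod n) := by
  haveI : NeZero n := ⟨by omega⟩
  rw [PySem.Set.contains_iff, PySem.Set.mem_ofList, List.mem_map]
  constructor
  · rintro ⟨x, hx, hfx⟩
    rw [PySem.Int.mod_eq_emod_of_pos hp] at hfx
    refine ⟨(x : ZMod n), ?_⟩
    have : ((x * x % p : Int) : ZMod n) = ((x * x : Int) : ZMod n) := by
      rw [← hn]; exact ZMod.intCast_mod _ _
    rw [← hfx, this]; push_cast; ring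
  · rintro ⟨r, hr⟩
    refine ⟨(r.val : Int), ?_, ?_⟩
    · rw [PySem.List.mem_pyRange_one]
      have := ZMod.val_lt r
      omega
    · rw [PySem.Int.mod_eq_emod_of_pos hp]
      refine (zcast_inj p ((r.val : Int) * (r.val : Int) % p) fv n hn
        (Int.emod_nonneg _ (by omega)) ?_ hfv hfv' ?_)
      · rw [← hn]; exact Int.emod_lt_of_pos _ (by omega)
      · have h1 : (((r.val : Int) * (r.val : Int) % p : Int) : ZMod n)
            = (((r.val : Int) * (r.val : Int) : Int) : ZMod n) := by
          rw [← hn]; exact ZMod.intCast_mod _ _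
        rw [h1]
        push_cast [ZMod.natCast_val, ZMod.cast_id]
        exact hr.symm

-- Unfolding legendre on an in-range residue: it classifies by val = fv ^ ((n-1)/2) % p.
lemma legendre_eq (p fv : Int) (n : Nat) (hn : (n : Int) = p) (hp : 2 ≤ p)
    (hfv : 0 ≤ fv) (hfv' : fv < p) (h0 : fv ≠ 0) :
    legendre fv p =
      (if fv ^ ((n - 1) / 2) % p ≤ 1 then fv ^ ((n - 1) / 2) % p
       else fv ^ ((n - 1) / 2) % p - p) := by
  simp only [legendre]
  have he : (PySem.Int.floordiv (p - 1) 2).toNat = (n - 1) / 2 := by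
    rw [PySem.Int.floordiv_eq_ediv_of_pos (by omega)]; omega
  rw [PySem.Int.mod_eq_emod_of_pos (by omega), Int.emod_eq_of_lt hfv hfv']
  rw [if_neg h0]
  rw [PySem.Int.powMod_eq_emod _ _ (by omega : (0:Int) < p), he]

-- The classifying power equals 1 in ZMod n exactly when fv is a nonzero square (prime n).
lemma power_one_iff (p fv : Int) (n : Nat) (hn : (n : Int) = p) (hp : n.Prime)
    (hfv : 0 < fv) (hfv' : fv < p) :
    fv ^ ((n - 1) / 2) % p = 1 ↔ IsSquare (fv : ZMod n) := by
  haveI : Fact n.Prime := ⟨hp⟩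
  have hp2 : 2 ≤ p := by have := hp.two_le; omega
  have hnz : (fv : ZMod n) ≠ 0 := by
    intro hz
    have hd := (ZMod.intCast_zmod_eq_zero_iff_dvd fv n).mp hz
    rw [hn] at hd
    have := Int.le_of_dvd hfv hd
    omega
  have hcast : ((fv ^ ((n - 1) / 2) % p : Int) : ZMod n) = (fv : ZMod n) ^ ((n - 1) / 2) := by
    rw [← hn, ZMod.intCast_mod]; push_cast; ring
  constructor
  · intro h1
    by_cases h2 : n = 2
    · subst h2
      -- in ZMod 2 the only nonzero element is 1, a square
      have hfv2 : fv = 1 := by omega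
      subst hfv2
      exact ⟨1, by norm_num⟩
    · have hodd : n % 2 = 1 := Nat.odd_iff.mp (hp.odd_of_ne_two h2)
      rw [ZMod.euler_criterion n hnz]
      have he : (n - 1) / 2 = n / 2 := by omega
      rw [← he, ← hcast, h1]
      push_cast; rfl
  · intro hsq
    by_cases h2 : n = 2
    · subst h2
      have hfv2 : fv = 1 := by omega
      have hp2' : p = 2 := by omega
      subst hfv2; subst hp2'; decide
    · have hodd : n % 2 = 1 := Nat.odd_iff.mp (hp.odd_of_ne_two h2)
      have he : (n - 1) / 2 = n / 2 := by omega
      have h1 : (fv : ZMod n) ^ ((n - 1) / 2) = 1 := by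
        rw [he]; exact (ZMod.euler_criterion n hnz).mp hsq
      refine zcast_inj p _ 1 n hn (Int.emod_nonneg _ (by omega)) ?_ (by omega) (by omega) ?_
      · rw [← hn]; exact Int.emod_lt_of_pos _ (by omega)
      · rw [hcast, h1]; push_cast; rfl

-- For prime n = p and nonzero fv in range, the power is nonzero mod p.
lemma power_ne_zero (p fv : Int) (n : Nat) (hn : (n : Int) = p) (hp : n.Prime)
    (hfv : 0 < fv) (hfv' : fv < p) :
    fv ^ ((n - 1) / 2) % p ≠ 0 := by
  haveI : Fact n.Prime := ⟨hp⟩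
  intro h
  have hnz : (fv : ZMod n) ≠ 0 := by
    intro hz
    have hd := (ZMod.intCast_zmod_eq_zero_iff_dvd fv n).mp hz
    rw [hn] at hd
    have := Int.le_of_dvd hfv hd
    omega
  have hcast : ((fv ^ ((n - 1) / 2) % p : Int) : ZMod n) = (fv : ZMod n) ^ ((n - 1) / 2) := by
    rw [← hn, ZMod.intCast_mod]; push_cast; ring
  have : (fv : ZMod n) ^ ((n - 1) / 2) = 0 := by rw [← hcast, h]; push_cast; rfl
  exact pow_ne_zero _ hnz this

-- Per-residue weight equality on prime moduli.
lemma step_eq (p fv total : Int) (n : Nat) (hn : (n : Int) = p) (hp : n.Prime)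
    (hfv : 0 ≤ fv) (hfv' : fv < p)
    (squares : PySem.Set Int)
    (hsq : (PySem.Set.contains squares fv) = true ↔ IsSquare (fv : ZMod n)) :
    (if legendre fv p = 0 then total + 1
     else if legendre fv p = 1 then total + 2
     else total) =
    (if fv = 0 then total + 1
     else if squares.contains fv then total + 2
     else total) := by
  have hp2 : 2 ≤ p := by have := hp.two_le; omega
  by_cases h0 : fv = 0
  · subst h0
    have : legendre 0 p = 0 := by
      unfold legendre
      rw [PySem.Int.mod_eq_emod_of_pos (by omega), Int.emod_eq_of_lt le_rfl (by omega)]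
      simp
    rw [this]; simp
  · have hl := legendre_eq p fv n hn hp2 hfv hfv' h0
    have hne := power_ne_zero p fv n hn hp (by omega) hfv'
    have hone := power_one_iff p fv n hn hp (by omega) hfv'
    set v := fv ^ ((n - 1) / 2) % p with hv
    have hvlo : 0 ≤ v := Int.emod_nonneg _ (by omega)
    have hvhi : v < p := Int.emod_lt_of_pos _ (by omega)
    have hlsne0 : legendre fv p ≠ 0 := by rw [hl]; split_ifs <;> omega
    have hls1 : (legendre fv p = 1) ↔ v = 1 := by rw [hl]; split_ifs <;> omega
    by_cases hv1 : v = 1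
    · rw [if_neg hlsne0, if_pos (hls1.mpr hv1), if_neg h0,
        if_pos (hsq.mpr (hone.mp hv1))]
    · rw [if_neg hlsne0, if_neg (fun h => hv1 (hls1.mp h)), if_neg h0,
        if_neg (fun hc => hv1 (hone.mpr (hsq.mp hc)))]

-- Equality of the two folds on prime moduli.
lemma folds_eq_prime (coeffs_list : List Int) (p : Int) (n : Nat)
    (hn : (n : Int) = p) (hp : n.Prime) :
    count_affine coeffs_list p = count_affine_alt coeffs_list p := by
  have hp0 : 0 < p := by have := hp.two_le; omega
  simp only [count_affine, count_affine_alt]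
  apply PySem.List.foldl_congr_mem
  intro total yv _
  apply step_eq p _ total n hn hp
    (horner_range coeffs_list p yv 0 hp0 ⟨le_rfl, hp0⟩).1
    (horner_range coeffs_list p yv 0 hp0 ⟨le_rfl, hp0⟩).2
  exact squares_mem p _ n hn hp0
    (horner_range coeffs_list p yv 0 hp0 ⟨le_rfl, hp0⟩).1
    (horner_range coeffs_list p yv 0 hp0 ⟨le_rfl, hp0⟩).2

-- p = 1: one iteration, the residue is forced to 0, both sides add 1.
lemma folds_eq_one (coeffs_list : List Int) :
    count_affine coeffs_list 1 = count_affine_alt coeffs_list 1 := by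
  simp only [count_affine, count_affine_alt]
  apply PySem.List.foldl_congr_mem
  intro total yv _
  have h := horner_range coeffs_list 1 yv 0 (by omega) ⟨le_rfl, by omega⟩
  have h0 : coeffs_list.foldl (fun fv c => PySem.Int.mod (fv * yv + c) 1) 0 = 0 := by omega
  rw [h0]
  have : legendre 0 1 = 0 := by decide
  rw [this]; simp

-- ===== VERDICT (by name: the statement is the Claim_ definition above) =====
theorem count_affine_spec : Claim_equal_count_affine := by
  intro coeffs_list p _ hpre
  unfold Spec_count_affine
  rcases hpre with hle | hpr
  · by_cases h1 : p = 1
    · subst h1; exact folds_eq_one coeffs_list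
    · -- p ≤ 0 : range(p) is empty, both return 0
      unfold count_affine count_affine_alt
      rw [PySem.List.pyRange_one_eq_nil (by omega)]
      simp
  · exact folds_eq_prime coeffs_list p p.toNat (by have := hpr.two_le; omega) hpr
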